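-- pv_equiv track=rewrite | github.com/estanixx/un | edd/04-search-sort/2.py | getSortedOccurrencies
-- ===== SOURCE A (Python) =====
-- def getSortedOccurrencies(arr):
--   occurrencies = dict()
--   for el in arr:
--     current_count = occurrencies.get(el)
--     occurrencies[el] = 1 if current_count is None else current_count + 1
--   arr = list(occurrencies.keys())
--   n = len(arr)
--   for i in range(2, n + 1):
--     for j in range(n - i + 1):
--       if arr[j] > arr[j + 1]:
--         arr[j], arr[j + 1] = arr[j + 1], arr[j]
--   return [occurrencies[el] for el in arr]
-- ===== SOURCE B (Python) =====
-- def getSortedOccurrencies(arr):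
--   return [arr.count(x) for x in sorted(set(arr))]
-- ===== Notes on version B (the rewrite author's own statement) =====
-- stated objective: simpler
-- what changed: Replaces the hand-built dict counter plus an in-place bubble sort of the keys by a one-line comprehension: sort the distinct values with the builtin sort and count each with list.count.
import Mathlib
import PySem

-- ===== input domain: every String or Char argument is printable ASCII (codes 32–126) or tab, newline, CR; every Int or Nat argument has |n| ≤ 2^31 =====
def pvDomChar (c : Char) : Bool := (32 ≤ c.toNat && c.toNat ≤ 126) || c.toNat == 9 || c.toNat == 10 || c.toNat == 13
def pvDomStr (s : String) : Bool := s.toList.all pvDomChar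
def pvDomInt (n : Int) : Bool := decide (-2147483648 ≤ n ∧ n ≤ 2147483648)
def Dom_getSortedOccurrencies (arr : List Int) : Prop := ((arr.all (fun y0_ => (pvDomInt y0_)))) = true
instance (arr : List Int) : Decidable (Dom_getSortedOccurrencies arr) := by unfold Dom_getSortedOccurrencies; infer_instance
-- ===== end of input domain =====

-- B replaces A's hand-built dict counter and in-place bubble sort of the keys by
-- sorting the distinct values with the builtin sort and counting each with list.count (objective: simpler).

-- ===== PORT A =====
def getSortedOccurrencies (arr : List Int) : List Int :=
  -- occurrencies = dict(); for el in arr: … (get then insert)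
  let occurrencies : PySem.Dict Int Int :=
    arr.foldl (fun d el =>
      let currentCount := d.get? el
      d.insert el (match currentCount with | none => (1 : Int) | some c => c + 1))
      PySem.Dict.empty
  -- arr = list(occurrencies.keys())
  let arr2 := occurrencies.keys
  let n : Int := PySem.List.len arr2
  -- bubble sort: for i in range(2, n+1): for j in range(n-i+1): if arr[j] > arr[j+1]: swap
  let arr3 :=
    (PySem.List.pyRange 2 (n + 1) 1).foldl (fun a i =>
      (PySem.List.pyRange 0 (n - i + 1) 1).foldl (fun a j =>
        let u := PySem.List.pyGetD a j 0
        let v := PySem.List.pyGetD a (j + 1) 0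
        if u > v then PySem.List.pySetD (PySem.List.pySetD a j v) (j + 1) u else a) a) arr2
  -- [occurrencies[el] for el in arr]  (el is always a key, so the lookup cannot raise)
  arr3.map (fun el => (occurrencies.get? el).getD 0)

-- ===== PORT B =====
def getSortedOccurrencies_alt (arr : List Int) : List Int :=
  (PySem.List.sorted (PySem.Set.ofList arr) (fun x => x) false).map
    (fun x => (PySem.List.count arr x : Int))

-- ===== PRECONDITION & SPEC =====
def Spec_getSortedOccurrencies (arr : List Int) (out : List Int) : Prop := out = getSortedOccurrencies_alt arr
instance (arr : List Int) (out : List Int) : Decidable (Spec_getSortedOccurrencies arr out) := by unfold Spec_getSortedOccurrencies; infer_instance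

-- ===== CLAIM (what is proved, stated in full; the proofs are below) =====
def Claim_equal_getSortedOccurrencies : Prop := ∀ (arr : List Int), Dom_getSortedOccurrencies arr → Spec_getSortedOccurrencies arr (getSortedOccurrencies arr)

-- ===== LEMMAS AND PROOFS =====

-- one bubble step at list positions m, m+1 (structural counterpart of the indexed inner body)
def pvBubN : Nat → List Int → List Int
  | 0, a => a
  | _ + 1, [] => []
  | _ + 1, [x] => [x]
  | m + 1, x :: y :: t => if x > y then y :: pvBubN m (x :: t) else x :: pvBubN m (y :: t)

-- the outer loop: passes of lengths k, k-1, …, 1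
def pvSortN : Nat → List Int → List Int
  | 0, a => a
  | k + 1, a => pvSortN k (pvBubN (k + 1) a)

lemma pvBubN_length : ∀ (m : Nat) (a : List Int), (pvBubN m a).length = a.length
  | 0, _ => rfl
  | _ + 1, [] => rfl
  | _ + 1, [_] => rfl
  | m + 1, x :: y :: t => by
    simp only [pvBubN]
    split <;> simp [pvBubN_length m]

lemma pvBubN_perm : ∀ (m : Nat) (a : List Int), (pvBubN m a).Perm a
  | 0, _ => List.Perm.refl _
  | _ + 1, [] => List.Perm.refl _
  | _ + 1, [_] => List.Perm.refl _
  | m + 1, x :: y :: t => by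
    simp only [pvBubN]
    split
    · exact ((pvBubN_perm m (x :: t)).cons y).trans (List.Perm.swap x y t)
    · exact (pvBubN_perm m (y :: t)).cons x

-- getD on an appended list at the junction
lemma pvGetD_app : ∀ (pre : List Int) (x : Int) (rest : List Int),
    (pre ++ x :: rest).getD pre.length 0 = x
  | [], _, _ => rfl
  | _ :: pre, x, rest => pvGetD_app pre x rest

lemma pvSet_app : ∀ (pre : List Int) (x : Int) (rest : List Int) (v : Int),
    (pre ++ x :: rest).set pre.length v = pre ++ v :: rest
  | [], _, _, _ => rfl
  | _ :: pre, x, rest, v => by simp [pvSet_app pre x rest v]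

lemma pvGetD_app1 (pre : List Int) (x y : Int) (rest : List Int) :
    (pre ++ x :: y :: rest).getD (pre.length + 1) 0 = y := by
  simp

lemma pvSet_app1 (pre : List Int) (x y : Int) (rest : List Int) (v : Int) :
    (pre ++ x :: y :: rest).set (pre.length + 1) v = pre ++ x :: v :: rest := by
  simp

-- the indexed inner loop equals the structural pass
lemma pvInner_eq : ∀ (m : Nat) (pre a : List Int), m < a.length →
    (PySem.List.pyRange (pre.length) (pre.length + (m : Int)) 1).foldl (fun a j =>
        let u := PySem.List.pyGetD a j 0
        let v := PySem.List.pyGetD a (j + 1) 0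
        if u > v then PySem.List.pySetD (PySem.List.pySetD a j v) (j + 1) u else a)
      (pre ++ a) = pre ++ pvBubN m a := by
  intro m
  induction m with
  | zero =>
    intro pre a _
    rw [PySem.List.pyRange_one_eq_nil (by push_cast; omega)]
    simp [pvBubN]
  | succ m ih =>
    intro pre a h
    match a with
    | x :: y :: t =>
      rw [PySem.List.pyRange_one_cons (by push_cast; omega)]
      simp only [List.foldl_cons]
      have e1 : PySem.List.pyGetD (pre ++ x :: y :: t) (pre.length : Int) 0 = x := by
        rw [PySem.List.pyGetD_natCast, pvGetD_app]
      have ecast : ((pre.length : Int) + 1) = ((pre.length + 1 : Nat) : Int) := by push_cast; ring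
      have e2 : PySem.List.pyGetD (pre ++ x :: y :: t) ((pre.length : Int) + 1) 0 = y := by
        rw [ecast, PySem.List.pyGetD_natCast, pvGetD_app1]
      rw [e1, e2]
      by_cases hxy : x > y
      · rw [if_pos hxy, PySem.List.pySetD_natCast, pvSet_app, ecast, PySem.List.pySetD_natCast,
          pvSet_app1]
        have estep : pre ++ y :: x :: t = (pre ++ [y]) ++ x :: t := by simp
        rw [estep]
        have hrange : ((pre.length + 1 : Nat) : Int) = ((pre ++ [y]).length : Int) := by simp
        have hend : (pre.length : Int) + ((m + 1 : Nat) : Int) = ((pre ++ [y]).length : Int) + (m : Int) := by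
          simp; ring
        rw [hrange, hend, ih (pre ++ [y]) (x :: t) (by simp at h ⊢; omega)]
        simp [pvBubN, if_pos hxy]
      · rw [if_neg hxy]
        have estep : pre ++ x :: y :: t = (pre ++ [x]) ++ y :: t := by simp
        rw [estep]
        have hrange : (pre.length : Int) + 1 = ((pre ++ [x]).length : Int) := by simp
        have hend : (pre.length : Int) + ((m + 1 : Nat) : Int) = ((pre ++ [x]).length : Int) + (m : Int) := by
          simp; ring
        rw [hrange, hend, ih (pre ++ [x]) (y :: t) (by simp at h ⊢; omega)]
        simp [pvBubN, if_neg hxy]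

-- the outer loop equals pvSortN
lemma pvOuter_eq : ∀ (k : Nat) (a : List Int), k < a.length →
    (PySem.List.pyRange ((a.length : Int) + 1 - k) ((a.length : Int) + 1) 1).foldl (fun b i =>
      (PySem.List.pyRange 0 ((a.length : Int) - i + 1) 1).foldl (fun a j =>
        let u := PySem.List.pyGetD a j 0
        let v := PySem.List.pyGetD a (j + 1) 0
        if u > v then PySem.List.pySetD (PySem.List.pySetD a j v) (j + 1) u else a) b) a
    = pvSortN k a := by
  intro k
  induction k with
  | zero =>
    intro a _
    rw [PySem.List.pyRange_one_eq_nil (by push_cast; omega)]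
    rfl
  | succ k ih =>
    intro a h
    rw [PySem.List.pyRange_one_cons (by push_cast; omega)]
    simp only [List.foldl_cons]
    have einner := pvInner_eq (k + 1) [] a (by omega)
    simp only [List.nil_append, List.length_nil, Nat.cast_zero] at einner
    have e0 : (a.length : Int) - ((a.length : Int) + 1 - ((k + 1 : Nat) : Int)) + 1
        = (0 : Int) + ((k + 1 : Nat) : Int) := by push_cast; ring
    rw [e0, einner]
    have ih' := ih (pvBubN (k + 1) a) (by rw [pvBubN_length]; omega)
    rw [pvBubN_length] at ih'
    have e1 : (a.length : Int) + 1 - ((k + 1 : Nat) : Int) + 1 = (a.length : Int) + 1 - (k : Int) := by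
      push_cast; ring
    rw [e1]
    exact ih' 

def pvSettled (k : Nat) (a : List Int) : Prop :=
  (a.drop k).Pairwise (· ≤ ·) ∧ ∀ x ∈ a.take k, ∀ y ∈ a.drop k, x ≤ y

lemma pvBub_split : ∀ (m : Nat) (a : List Int), m < a.length →
    ∃ b M, pvBubN m a = b ++ M :: a.drop (m + 1) ∧ b.length = m ∧
      (M :: b).Perm (a.take (m + 1)) ∧ ∀ x ∈ b, x ≤ M := by
  intro m
  induction m with
  | zero =>
    intro a h
    match a with
    | x :: t => exact ⟨[], x, by simp [pvBubN]⟩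
  | succ m ih =>
    intro a h
    match a with
    | x :: y :: t =>
      have ht : m < (x :: t).length := by simp at h ⊢; omega
      by_cases hxy : x > y
      · obtain ⟨b, M, he, hl, hp, hb⟩ := ih (x :: t) ht
        refine ⟨y :: b, M, ?_, by simp [hl], ?_, ?_⟩
        · simp [pvBubN, if_pos hxy, he]
        · have h3 : (y :: (x :: t).take (m + 1)).Perm ((x :: y :: t).take (m + 2)) := by
            simp only [List.take_succ_cons]
            exact List.Perm.swap x y _
          exact ((List.Perm.swap y M b).trans (hp.cons y)).trans h3
        · intro z hz
          rcases List.mem_cons.mp hz with rfl | hz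
          · have hxM : x ≤ M := by
              have hx : x ∈ M :: b := hp.symm.mem_iff.mp (by simp [List.take_succ_cons])
              rcases List.mem_cons.mp hx with rfl | hx
              · exact le_refl _
              · exact hb _ hx
            omega
          · exact hb _ hz
      · obtain ⟨b, M, he, hl, hp, hb⟩ := ih (y :: t) (by simp at h ⊢; omega)
        refine ⟨x :: b, M, ?_, by simp [hl], ?_, ?_⟩
        · simp [pvBubN, if_neg hxy, he]
        · have h3 : (x :: (y :: t).take (m + 1)).Perm ((x :: y :: t).take (m + 2)) := by
            simp only [List.take_succ_cons]
            exact List.Perm.refl _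
          exact ((List.Perm.swap x M b).trans (hp.cons x)).trans h3
        · intro z hz
          rcases List.mem_cons.mp hz with rfl | hz
          · have hyM : y ≤ M := by
              have hy : y ∈ M :: b := hp.symm.mem_iff.mp (by simp [List.take_succ_cons])
              rcases List.mem_cons.mp hy with rfl | hy
              · exact le_refl _
              · exact hb _ hy
            omega
          · exact hb _ hz

lemma pvSortN_sorted : ∀ (k : Nat) (a : List Int), k < a.length → pvSettled (k + 1) a →
    (pvSortN k a).Pairwise (· ≤ ·) ∧ (pvSortN k a).Perm a := by
  intro k
  induction k with
  | zero =>
    intro a h hs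
    refine ⟨?_, List.Perm.refl _⟩
    match a with
    | x :: t =>
      obtain ⟨hd, hmix⟩ := hs
      simp only [List.drop_succ_cons, List.drop_zero] at hd
      exact List.Pairwise.cons
        (fun y hy => hmix x (by simp) y (by simpa using hy)) hd
  | succ k ih =>
    intro a h hs
    obtain ⟨b, M, he, hl, hp, hb⟩ := pvBub_split (k + 1) a h
    have hperm : (pvBubN (k + 1) a).Perm a := pvBubN_perm _ _
    have hlen : (pvBubN (k + 1) a).length = a.length := pvBubN_length _ _
    have hMmem : M ∈ a.take (k + 2) := hp.subset (by simp)
    have hbmem : ∀ x ∈ b, x ∈ a.take (k + 2) := fun x hx => hp.subset (by simp [hx])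
    have hdrop : (pvBubN (k + 1) a).drop (k + 1) = M :: a.drop (k + 2) := by
      rw [he, List.drop_left' hl]
    have htake : (pvBubN (k + 1) a).take (k + 1) = b := by
      rw [he, List.take_left' hl]
    have hsettled : pvSettled (k + 1) (pvBubN (k + 1) a) := by
      constructor
      · rw [hdrop]
        exact List.Pairwise.cons (fun y hy => hs.2 M hMmem y hy) hs.1
      · intro x hx y hy
        rw [htake] at hx
        rw [hdrop] at hy
        rcases List.mem_cons.mp hy with rfl | hy
        · exact hb _ hx
        · exact hs.2 x (hbmem _ hx) y hy
    have hres := ih (pvBubN (k + 1) a) (by omega) hsettled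
    exact ⟨hres.1, hres.2.trans hperm⟩

lemma pvCounter_step (arr : List Int) :
    arr.foldl (fun (d : PySem.Dict Int Int) el =>
        let currentCount := d.get? el
        d.insert el (match currentCount with | none => (1 : Int) | some c => c + 1))
      PySem.Dict.empty = PySem.Dict.counter arr := by
  rw [← PySem.Dict.foldl_insert_getD_add_one_eq_counter]
  congr 1
  funext d el
  rw [PySem.Dict.getD_eq_get?_getD]
  cases d.get? el <;> simp

lemma pvSettled_full (a : List Int) : pvSettled a.length a := by
  constructor <;> simp

-- the bubble-sorted keys are sorted(keys) (n ≥ 1)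
lemma pvSorted_eq (a : List Int) (h : 1 ≤ a.length) :
    PySem.List.sorted a (fun x => x) false = pvSortN (a.length - 1) a := by
  have hk : a.length - 1 < a.length := by omega
  have hs : pvSettled (a.length - 1 + 1) a := by
    rw [Nat.sub_add_cancel h]
    exact pvSettled_full a
  obtain ⟨hpw, hperm⟩ := pvSortN_sorted (a.length - 1) a hk hs
  exact PySem.List.sorted_id_eq_of_perm_of_pairwise _ _ hperm hpw

-- ===== VERDICT (by name: the statement is the Claim_ definition above) =====
theorem getSortedOccurrencies_spec : Claim_equal_getSortedOccurrencies := by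
  intro arr _
  unfold Spec_getSortedOccurrencies getSortedOccurrencies getSortedOccurrencies_alt
  simp only [pvCounter_step, PySem.Dict.keys_counter, PySem.List.len_eq]
  have hfun : (fun el => ((PySem.Dict.counter arr).get? el).getD 0)
      = (fun x => (PySem.List.count arr x : Int)) := by
    funext el
    rw [← PySem.Dict.getD_eq_get?_getD, PySem.Dict.getD_counter, PySem.List.count_eq]
  rw [hfun]
  by_cases hK : (PySem.Set.ofList arr).length = 0
  · rw [List.eq_nil_of_length_eq_zero hK]
    rw [PySem.List.pyRange_one_eq_nil (by norm_num)]
    simp [PySem.List.sorted_eq_nil_iff]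
  · have h1 : 1 ≤ (PySem.Set.ofList arr).length := by omega
    have e2 : (2 : Int) = ((PySem.Set.ofList arr).length : Int) + 1
        - (((PySem.Set.ofList arr).length - 1 : Nat) : Int) := by
      rw [Nat.cast_sub h1]; push_cast; ring
    rw [e2, pvOuter_eq ((PySem.Set.ofList arr).length - 1) (PySem.Set.ofList arr) (by omega),
      pvSorted_eq (PySem.Set.ofList arr) h1]
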